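-- pv_equiv track=rewrite | github.com/deepweaver/Pathfinding_Alpha-Beta_Pruning | final_submit/fileIO.py | separateGrids
-- ===== SOURCE A (Python) =====
-- def separateGrids(gridLines):
--     grids = []
--     aGrid = []
--     graphX = 0
--     graphY = 0
--
--     for line in gridLines:
--         if line != '':
--             aGrid.append(line)
--         else: #line == ''
--             grids.append(aGrid)
--             aGrid = []
--
--     grids.append(aGrid)
--     return grids
-- ===== SOURCE B (Python) =====
-- def separateGrids(gridLines):
--     # Index-table-then-slice: find all separator positions in one pass,
--     # then build the grids by slicing between consecutive separators.
--     seps = [i for i, line in enumerate(gridLines) if line == '']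
--     grids = []
--     start = 0
--     for s in seps:
--         grids.append(gridLines[start:s])
--         start = s + 1
--     grids.append(gridLines[start:])
--     return grids
-- ===== Notes on version B (the rewrite author's own statement) =====
-- stated objective: alternative
-- what changed: Replaces A's accumulate-and-flush buffer loop with an index-table-then-slice shape: collect all empty-line separator indices first, then slice the input between consecutive separators.
import Mathlib
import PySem

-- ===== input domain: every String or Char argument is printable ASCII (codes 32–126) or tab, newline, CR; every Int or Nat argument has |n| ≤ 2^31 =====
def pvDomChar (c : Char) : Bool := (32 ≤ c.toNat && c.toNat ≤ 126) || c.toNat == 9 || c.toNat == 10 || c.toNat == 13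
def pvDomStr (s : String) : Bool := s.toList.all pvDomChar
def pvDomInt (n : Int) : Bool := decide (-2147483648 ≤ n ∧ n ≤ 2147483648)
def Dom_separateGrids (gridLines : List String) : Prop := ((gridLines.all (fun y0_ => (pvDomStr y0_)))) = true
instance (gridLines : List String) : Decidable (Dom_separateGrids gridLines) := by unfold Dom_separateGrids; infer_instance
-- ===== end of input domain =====

-- B replaces A's accumulate-and-flush buffer loop with an index-table-then-slice build (same values; objective: alternative).

-- ===== PORT A =====
-- for line in gridLines: accumulate into aGrid, flush into grids on ''; then append the last buffer.
def separateGrids (gridLines : List String) : List (List String) :=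
  let st := gridLines.foldl
    (fun (p : List (List String) × List String) line =>
      if line ≠ "" then (p.1, p.2 ++ [line]) else (p.1 ++ [p.2], []))
    ([], [])
  st.1 ++ [st.2]

-- ===== PORT B =====
-- seps = [i for i,line in enumerate(gridLines) if line == '']; then slice between consecutive separators.
def separateGrids_alt (gridLines : List String) : List (List String) :=
  let seps := ((PySem.List.enumerate gridLines 0).filter (fun p => p.2 == "")).map (fun p => p.1)
  let st := seps.foldl
    (fun (p : List (List String) × Int) s =>
      (p.1 ++ [PySem.List.slice gridLines (some p.2) (some s)], s + 1))
    ([], 0)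
  st.1 ++ [PySem.List.slice gridLines (some st.2) none]

-- ===== PRECONDITION & SPEC =====
def Spec_separateGrids (gridLines : List String) (out : List (List String)) : Prop := out = separateGrids_alt gridLines
instance (gridLines : List String) (out : List (List String)) : Decidable (Spec_separateGrids gridLines out) := by unfold Spec_separateGrids; infer_instance

-- ===== CLAIM (what is proved, stated in full; the proofs are below) =====
def Claim_equal_separateGrids : Prop := ∀ (gridLines : List String), Dom_separateGrids gridLines → Spec_separateGrids gridLines (separateGrids gridLines)

-- ===== LEMMAS AND PROOFS =====

-- common recursive characterisation of the split
def splitSpec : List String → List (List String)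
  | [] => [[]]
  | l :: ls =>
    let t := splitSpec ls
    if l = "" then [] :: t else (l :: t.headD []) :: t.tail

theorem splitSpec_ne_nil (gl : List String) : splitSpec gl ≠ [] := by
  cases gl with
  | nil => simp [splitSpec]
  | cons a l => simp only [splitSpec]; split <;> simp

-- ===== A-side: the fold-with-buffer computes splitSpec =====
theorem separateGrids_foldl_inv (ls : List String)
    (grids : List (List String)) (aGrid : List String) :
    (let st := ls.foldl
      (fun (p : List (List String) × List String) line =>
        if line ≠ "" then (p.1, p.2 ++ [line]) else (p.1 ++ [p.2], []))
      (grids, aGrid)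
     st.1 ++ [st.2]) =
    grids ++ (aGrid ++ (splitSpec ls).headD []) :: (splitSpec ls).tail := by
  induction ls generalizing grids aGrid with
  | nil => simp [splitSpec]
  | cons l ls ih =>
    simp only [List.foldl_cons]
    by_cases h : l = ""
    · subst h
      simp only [ne_eq, not_true_eq_false, if_false, splitSpec]
      rw [ih]
      cases hsa : splitSpec ls with
      | nil => exact absurd hsa (splitSpec_ne_nil ls)
      | cons x xs => simp
    · simp only [ne_eq, h, not_false_eq_true, if_true, splitSpec]
      rw [ih]
      cases hsa : splitSpec ls with
      | nil => exact absurd hsa (splitSpec_ne_nil ls)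
      | cons x xs => simp

theorem separateGrids_eq_splitSpec (gl : List String) :
    separateGrids gl = splitSpec gl := by
  unfold separateGrids
  rw [separateGrids_foldl_inv]
  cases hsa : splitSpec gl with
  | nil => exact absurd hsa (splitSpec_ne_nil gl)
  | cons x xs => simp

-- ===== B-side =====
-- the separator-index table of gl
def sepsOf (gl : List String) : List Int :=
  ((PySem.List.enumerate gl 0).filter (fun p => p.2 == "")).map (fun p => p.1)

-- B's slicing loop written as a recursion producing the list in order
def goSlice (gl : List String) : List Int → Int → List (List String)
  | [], start => [PySem.List.slice gl (some start) none]
  | s :: rest, start => PySem.List.slice gl (some start) (some s) :: goSlice gl rest (s + 1)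

theorem foldl_goSlice (gl : List String) (seps : List Int)
    (acc : List (List String)) (start : Int) :
    (let st := seps.foldl
      (fun (p : List (List String) × Int) s =>
        (p.1 ++ [PySem.List.slice gl (some p.2) (some s)], s + 1))
      (acc, start)
     st.1 ++ [PySem.List.slice gl (some st.2) none]) =
    acc ++ goSlice gl seps start := by
  induction seps generalizing acc start with
  | nil => simp [goSlice]
  | cons s rest ih =>
    simp only [List.foldl_cons, goSlice]
    rw [ih]
    simp

theorem enumerate_shift {α : Type} (xs : List α) (s : Int) :
    PySem.List.enumerate xs (s + 1) =
      (PySem.List.enumerate xs s).map (fun p => (p.1 + 1, p.2)) := by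
  induction xs generalizing s with
  | nil => simp [PySem.List.enumerate_nil]
  | cons x xs ih =>
    rw [PySem.List.enumerate_cons, PySem.List.enumerate_cons, List.map_cons, ← ih]

theorem sepsOf_cons (l : String) (ls : List String) :
    sepsOf (l :: ls) =
      (if l = "" then [(0 : Int)] else []) ++ (sepsOf ls).map (fun s => s + 1) := by
  unfold sepsOf
  rw [PySem.List.enumerate_cons, enumerate_shift]
  by_cases h : l = "" <;>
    simp [h, List.filter_map, List.map_map, Function.comp_def]

theorem sepsOf_nonneg (gl : List String) : ∀ s ∈ sepsOf gl, 0 ≤ s := by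
  induction gl with
  | nil => simp [sepsOf]
  | cons l ls ih =>
    intro s hs
    rw [sepsOf_cons] at hs
    rcases List.mem_append.1 hs with h | h
    · split at h <;> simp_all
    · obtain ⟨t, ht, rfl⟩ := List.mem_map.1 h
      have := ih t ht; omega

theorem goSlice_shift (l : String) (ls : List String) (seps : List Int) (start : Int)
    (hseps : ∀ s ∈ seps, 0 ≤ s) (hstart : 0 ≤ start) :
    goSlice (l :: ls) (seps.map (fun s => s + 1)) (start + 1) =
      goSlice ls seps start := by
  induction seps generalizing start with
  | nil =>
    simp only [List.map_nil, goSlice]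
    rw [PySem.List.slice_from _ (by omega : (0:Int) ≤ start + 1), PySem.List.slice_from _ hstart]
    have : (start + 1).toNat = start.toNat + 1 := by omega
    simp [this]
  | cons s rest ih =>
    have hs : 0 ≤ s := hseps s (by simp)
    simp only [List.map_cons, goSlice]
    rw [ih (s + 1) (fun t ht => hseps t (by simp [ht])) (by omega)]
    rw [PySem.List.slice_toNat _ (by omega : (0:Int) ≤ start + 1) (by omega : (0:Int) ≤ s + 1),
        PySem.List.slice_toNat _ hstart hs]
    have h1 : (start + 1).toNat = start.toNat + 1 := by omega
    have h2 : (s + 1).toNat = s.toNat + 1 := by omega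
    simp [h1, h2]

theorem goSlice_sepsOf (gl : List String) :
    goSlice gl (sepsOf gl) 0 = splitSpec gl := by
  induction gl with
  | nil => simp [sepsOf, goSlice, splitSpec, PySem.List.slice_from]
  | cons l ls ih =>
    rw [sepsOf_cons]
    by_cases h : l = ""
    · subst h
      simp only [if_true, List.singleton_append, goSlice]
      rw [goSlice_shift "" ls (sepsOf ls) 0 (sepsOf_nonneg ls) le_rfl, ih]
      simp [splitSpec, PySem.List.slice_toNat _ le_rfl le_rfl]
    · simp only [h, if_false, List.nil_append]
      cases hsep : sepsOf ls with
      | nil =>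
        rw [hsep] at ih
        simp only [List.map_nil, goSlice] at *
        rw [PySem.List.slice_from _ le_rfl] at *
        simp only [Int.toNat_zero, List.drop_zero] at *
        simp [splitSpec, h, ← ih]
      | cons s rest =>
        have hs : 0 ≤ s := sepsOf_nonneg ls s (by rw [hsep]; simp)
        have hrest : ∀ t ∈ rest, 0 ≤ t := fun t ht =>
          sepsOf_nonneg ls t (by rw [hsep]; simp [ht])
        rw [hsep] at ih
        simp only [List.map_cons, goSlice] at *
        rw [goSlice_shift l ls rest (s + 1) hrest (by omega)]
        rw [PySem.List.slice_toNat _ le_rfl (by omega : (0:Int) ≤ s + 1)]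
        rw [PySem.List.slice_toNat _ le_rfl hs] at ih
        have h2 : (s + 1).toNat = s.toNat + 1 := by omega
        simp only [Int.toNat_zero, List.drop_zero, Nat.sub_zero, h2] at *
        simp [splitSpec, h, ← ih, List.take_succ_cons]

theorem separateGrids_alt_eq_splitSpec (gl : List String) :
    separateGrids_alt gl = splitSpec gl := by
  unfold separateGrids_alt
  rw [foldl_goSlice]
  simpa [sepsOf] using goSlice_sepsOf gl

-- ===== VERDICT (by name: the statement is the Claim_ definition above) =====
theorem separateGrids_spec : Claim_equal_separateGrids := by
  intro gl _
  unfold Spec_separateGrids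
  rw [separateGrids_eq_splitSpec, separateGrids_alt_eq_splitSpec]
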